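-- pv_equiv track=rewrite | github.com/Debarshi-IT/AEC-Advanced-Coding-FSP-in-Python | Prog5.py | generate_series
-- ===== SOURCE A (Python) =====
-- def generate_series(n, term=1, series=None):
--     if series is None:
--         series = []
--
--     if len(series) == n:
--         return series
--
--     pos = len(series) + 1
--     if pos % 5 == 0:
--         # Every 5th position: sum of previous 4 terms
--         tsum = sum(series[-4:])
--         series.append(tsum)
--         return generate_series(n, term, series)
--     else:
--         series.append(term)
--         return generate_series(n, term + 1, series)
-- ===== SOURCE B (Python) =====
-- def generate_series(n, term=1, series=None):
--     if series is None:
--         series = []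
--     for pos in range(len(series) + 1, n + 1):
--         if pos % 5:
--             series.append(term)
--             term += 1
--         else:
--             series.append(series[-4] + series[-3] + series[-2] + series[-1])
--     return series
-- ===== Notes on version B (the rewrite author's own statement) =====
-- stated objective: idiomatic
-- what changed: Replaces A's tail recursion (which re-tests len(series)==n and threads term through every call) with a single for-loop over the positions range(len(series)+1, n+1), summing the last four elements by direct negative indexing instead of a slice; return-value equivalence (both mutate the passed-in list identically). Pre_ excludes len(series) > n (incl. negative n), where A's recursion never terminates (RecursionError).
import Mathlib
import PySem

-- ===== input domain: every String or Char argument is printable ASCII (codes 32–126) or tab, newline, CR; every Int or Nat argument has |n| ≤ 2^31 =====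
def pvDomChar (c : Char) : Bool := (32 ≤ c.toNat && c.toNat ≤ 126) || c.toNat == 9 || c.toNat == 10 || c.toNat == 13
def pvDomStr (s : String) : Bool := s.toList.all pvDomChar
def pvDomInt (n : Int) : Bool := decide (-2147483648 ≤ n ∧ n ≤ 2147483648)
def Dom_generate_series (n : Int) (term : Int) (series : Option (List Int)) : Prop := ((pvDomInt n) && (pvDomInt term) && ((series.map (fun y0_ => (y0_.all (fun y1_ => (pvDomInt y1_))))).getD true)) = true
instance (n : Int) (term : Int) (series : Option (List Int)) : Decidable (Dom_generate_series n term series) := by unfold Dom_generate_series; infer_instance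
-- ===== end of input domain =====

-- B replaces A's tail recursion (re-testing len(series)==n every call, appending one element per call)
-- by a single for-loop over the positions range(len(series)+1, n+1); equivalence is about the RETURN
-- value (both Pythons also mutate the passed-in list identically). Objective: simpler/idiomatic.

-- ===== PORT A =====
-- A's recursion does not terminate when len(series) > n (Python: RecursionError); the Lean port
-- carries the exact number of remaining calls as fuel, which Pre_ guarantees is sufficient.
def generate_series_go (fuel : Nat) (n : Int) (term : Int) (series : List Int) : List Int :=
  match fuel with
  | 0 => series
  | f + 1 =>
    if (series.length : Int) = n then series
    else
      let pos : Int := (series.length : Int) + 1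
      if PySem.Int.mod pos 5 = 0 then
        let tsum : Int := (PySem.List.slice series (some (-4)) none).sum
        generate_series_go f n term (series ++ [tsum])
      else
        generate_series_go f n (term + 1) (series ++ [term])

def generate_series (n : Int) (term : Int) (series : Option (List Int)) : List Int :=
  let s := series.getD []
  generate_series_go ((n - s.length).toNat + 1) n term s

-- ===== PORT B =====
-- series[-k] indexing ported as pyGetD: inside the loop a 5th position always has ≥ 4
-- predecessors, so the index is in range and the default is never used.
-- the loop body of B: one iteration at absolute position pos, state (series so far, next term)
def gs_step (st : List Int × Int) (pos : Int) : List Int × Int :=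
  if PySem.Int.mod pos 5 ≠ 0 then
    (st.1 ++ [st.2], st.2 + 1)
  else
    (st.1 ++ [PySem.List.pyGetD st.1 (-4) 0 + PySem.List.pyGetD st.1 (-3) 0 +
              PySem.List.pyGetD st.1 (-2) 0 + PySem.List.pyGetD st.1 (-1) 0], st.2)

def generate_series_alt (n : Int) (term : Int) (series : Option (List Int)) : List Int :=
  let s := series.getD []
  ((PySem.List.pyRange ((s.length : Int) + 1) (n + 1) 1).foldl gs_step (s, term)).1

-- ===== PRECONDITION & SPEC =====
-- Pre_ excludes the inputs on which A never returns: when len(series) > n (in particular every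
-- negative n) A's recursion never reaches the len==n base case and dies with a RecursionError.
def Pre_generate_series (n : Int) (term : Int) (series : Option (List Int)) : Prop :=
  ((series.getD []).length : Int) ≤ n
instance (n : Int) (term : Int) (series : Option (List Int)) : Decidable (Pre_generate_series n term series) := by unfold Pre_generate_series; infer_instance

def pvWitness_generate_series : Int × Int × Option (List Int) := (12, 1, none)

def Spec_generate_series (n : Int) (term : Int) (series : Option (List Int)) (out : List Int) : Prop := out = generate_series_alt n term series
instance (n : Int) (term : Int) (series : Option (List Int)) (out : List Int) : Decidable (Spec_generate_series n term series out) := by unfold Spec_generate_series; infer_instance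

-- ===== CLAIM (what is proved, stated in full; the proofs are below) =====
def Claim_equal_generate_series : Prop := ∀ (n : Int) (term : Int) (series : Option (List Int)), Dom_generate_series n term series → Pre_generate_series n term series → Spec_generate_series n term series (generate_series n term series)

-- ===== LEMMAS AND PROOFS =====

-- the last four elements: A's sum(series[-4:]) equals B's series[-4]+series[-3]+series[-2]+series[-1]
theorem sum_last_four (s : List Int) (h : 4 ≤ s.length) :
    (PySem.List.slice s (some (-4)) none).sum =
      PySem.List.pyGetD s (-4) 0 + PySem.List.pyGetD s (-3) 0 +
      PySem.List.pyGetD s (-2) 0 + PySem.List.pyGetD s (-1) 0 := by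
  rw [PySem.List.slice_from_neg_ofNat s 4 (by omega)]
  rw [PySem.List.pyGetD_neg_ofNat s 4 0 (by omega) (by omega)]
  rw [PySem.List.pyGetD_neg_ofNat s 3 0 (by omega) (by omega)]
  rw [PySem.List.pyGetD_neg_ofNat s 2 0 (by omega) (by omega)]
  rw [PySem.List.pyGetD_neg_ofNat s 1 0 (by omega) (by omega)]
  have hd : (s.drop (s.length - 4)).length = 4 := by
    rw [List.length_drop]; omega
  match hm : s.drop (s.length - 4), hd' : hd with
  | [a, b, c, d], _ =>
    have g : ∀ i : Nat, (hi : i < 4) →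
        s[s.length - 4 + i]'(by omega) = [a, b, c, d][i]'(by simpa using hi) := by
      intro i hi
      rw [show s[s.length - 4 + i]'(by omega) = (s.drop (s.length - 4))[i]'(by omega) from
        List.getElem_drop.symm]
      exact List.getElem_of_eq hm _
    have g0 := g 0 (by omega)
    have g1 := g 1 (by omega)
    have g2 := g 2 (by omega)
    have g3 := g 3 (by omega)
    simp at g0 g1 g2 g3
    have e0 : s.length - 4 + 0 = s.length - 4 := by omega
    have e1 : s.length - 4 + 1 = s.length - 3 := by omega
    have e2 : s.length - 4 + 2 = s.length - 2 := by omega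
    have e3 : s.length - 4 + 3 = s.length - 1 := by omega
    simp only [e1, e2, e3] at g0 g1 g2 g3
    simp [g0, g1, g2, g3]
    ring

-- core invariant: with exactly k elements still to append, A's recursion (with one spare unit of
-- fuel for the final len==n test) computes the same list as B's fold over the remaining positions
theorem go_succ (f : Nat) (n term : Int) (s : List Int) :
    generate_series_go (f + 1) n term s =
      if (s.length : Int) = n then s
      else if PySem.Int.mod ((s.length : Int) + 1) 5 = 0 then
        generate_series_go f n term (s ++ [(PySem.List.slice s (some (-4)) none).sum])
      else
        generate_series_go f n (term + 1) (s ++ [term]) := rfl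

-- core invariant: with exactly k elements still to append, A's recursion (with one spare unit of
-- fuel for the final len==n test) computes the same list as B's fold over the remaining positions
theorem go_eq_fold (k : Nat) : ∀ (n term : Int) (s : List Int), (s.length : Int) + k = n →
    generate_series_go (k + 1) n term s =
      ((PySem.List.pyRange ((s.length : Int) + 1) (n + 1) 1).foldl gs_step (s, term)).1 := by
  induction k with
  | zero =>
    intro n term s hlen
    rw [PySem.List.pyRange_one_eq_nil (by omega)]
    simp [generate_series_go]; omega
  | succ k ih =>
    intro n term s hlen
    have hne : ¬ ((s.length : Int) = n) := by omega
    rw [go_succ, if_neg hne, PySem.List.pyRange_one_cons (by omega), List.foldl_cons]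
    by_cases h5 : PySem.Int.mod ((s.length : Int) + 1) 5 = 0
    · -- 5th position: mod = 0 implies 5 | (len+1), hence len+1 >= 5 so s has >= 4 elements
      have hdvd : (5 : Int) ∣ ((s.length : Int) + 1) :=
        (PySem.Int.mod_eq_zero_iff_dvd _ _).mp h5
      have hlen4 : 4 <= s.length := by
        rcases hdvd with ⟨c, hc⟩
        have h0 : (0 : Int) <= (s.length : Int) := Int.natCast_nonneg _
        have hc1 : 1 <= c := by nlinarith
        omega
      have hstep : gs_step (s, term) ((s.length : Int) + 1) =
          (s ++ [PySem.List.pyGetD s (-4) 0 + PySem.List.pyGetD s (-3) 0 +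
                 PySem.List.pyGetD s (-2) 0 + PySem.List.pyGetD s (-1) 0], term) := by
        simp [gs_step]; exact hdvd
      rw [if_pos h5, hstep, sum_last_four s hlen4]
      have := ih n term (s ++ [PySem.List.pyGetD s (-4) 0 + PySem.List.pyGetD s (-3) 0 +
                 PySem.List.pyGetD s (-2) 0 + PySem.List.pyGetD s (-1) 0]) (by simp; omega)
      rw [this]
      have harg : (((s ++ [PySem.List.pyGetD s (-4) 0 + PySem.List.pyGetD s (-3) 0 +
          PySem.List.pyGetD s (-2) 0 + PySem.List.pyGetD s (-1) 0]).length : Int) + 1)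
          = (s.length : Int) + 1 + 1 := by simp
      rw [harg]
    · have hstep : gs_step (s, term) ((s.length : Int) + 1) = (s ++ [term], term + 1) := by
        simp [gs_step]
        exact fun hd => h5 ((PySem.Int.mod_eq_zero_iff_dvd _ _).mpr hd)
      rw [if_neg h5, hstep]
      have := ih n (term + 1) (s ++ [term]) (by simp; omega)
      rw [this]
      have harg : (((s ++ [term]).length : Int) + 1) = (s.length : Int) + 1 + 1 := by simp
      rw [harg]

-- ===== VERDICT (by name: the statement is the Claim_ definition above) =====
theorem generate_series_spec : Claim_equal_generate_series := by
  intro n term series _ hpre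
  unfold Spec_generate_series generate_series generate_series_alt
  have hpre' : ((series.getD []).length : Int) ≤ n := hpre
  have hk : ((series.getD []).length : Int) + ((n - (series.getD []).length).toNat : Int) = n := by
    omega
  simpa using go_eq_fold (n - (series.getD []).length).toNat n term (series.getD []) hk
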